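-- pv_equiv track=rewrite | github.com/dprgarner/advent-of-code-2020 | 14/dockingdata.py | expand_address
-- ===== SOURCE A (Python) =====
-- def expand_address(floating_address):
--     if 'X' not in floating_address:
--         return [floating_address]
--     idx = floating_address.find('X')
--     return (
--         expand_address(floating_address[:idx] + '0' + floating_address[idx+1:]) +
--         expand_address(floating_address[:idx] + '1' + floating_address[idx+1:])
--     )
-- ===== SOURCE B (Python) =====
-- def expand_address(floating_address):
--     # Single left-to-right pass: maintain the list of expanded prefixes (as char
--     # lists) and extend each by the next character (or by both '0' and '1' at an
--     # 'X'); join once at the end.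
--     results = [[]]
--     for c in floating_address:
--         if c == 'X':
--             results = [p + [b] for p in results for b in '01']
--         else:
--             for p in results:
--                 p.append(c)
--     return [''.join(p) for p in results]
-- ===== Notes on version B (the rewrite author's own statement) =====
-- stated objective: alternative
-- what changed: replaced the branching recursion that re-scans and re-slices the whole string at each X by a single left-to-right fold that extends a list of partial prefixes character by character
import Mathlib
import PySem

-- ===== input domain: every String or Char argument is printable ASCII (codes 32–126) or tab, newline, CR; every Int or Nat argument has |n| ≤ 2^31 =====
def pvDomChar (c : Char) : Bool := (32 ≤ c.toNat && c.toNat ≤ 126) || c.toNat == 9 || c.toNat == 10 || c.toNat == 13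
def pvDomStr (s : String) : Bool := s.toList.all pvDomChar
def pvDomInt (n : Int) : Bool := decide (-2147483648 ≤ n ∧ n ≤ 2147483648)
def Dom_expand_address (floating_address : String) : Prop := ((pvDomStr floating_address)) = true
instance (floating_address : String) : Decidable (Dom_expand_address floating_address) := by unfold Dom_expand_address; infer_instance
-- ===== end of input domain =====

-- B replaces A's branching recursion (re-slice the whole string at each 'X') by a single
-- left-to-right fold extending a list of partial prefixes; equivalence of return values is proved.

-- ===== PORT A =====
-- Literal transliteration of A's recursion on List Char; the fuel argument (number of 'X'
-- characters, which the recursion strictly decreases) only makes the same computation total.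
-- s[:idx] / s[idx+1:] with idx ≥ 0 are exactly List.take idx / List.drop (idx+1);
-- str.find of a present character is List.idxOf.
def pvExpandA (fuel : Nat) (s : List Char) : List (List Char) :=
  match fuel with
  | 0 => [s]
  | fuel + 1 =>
    if 'X' ∉ s then [s]
    else
      let idx := s.idxOf 'X'
      pvExpandA fuel (s.take idx ++ ['0'] ++ s.drop (idx + 1)) ++
      pvExpandA fuel (s.take idx ++ ['1'] ++ s.drop (idx + 1))

def expand_address (floating_address : String) : List String :=
  (pvExpandA (floating_address.toList.count 'X') floating_address.toList).map String.mk

-- ===== PORT B =====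
-- Source B's fold: the accumulator is the list of expanded prefixes (as List Char), extended
-- by each character in turn; [p + b for p in results for b in '01'] is the flatMap.
def expand_address_alt (floating_address : String) : List String :=
  (floating_address.toList.foldl
    (fun results c =>
      if c == 'X' then results.flatMap (fun p => [p ++ ['0'], p ++ ['1']])
      else results.map (fun p => p ++ [c]))
    [([] : List Char)]).map String.mk

-- ===== PRECONDITION & SPEC =====
def Spec_expand_address (floating_address : String) (out : List String) : Prop :=
  out = expand_address_alt floating_address
instance (floating_address : String) (out : List String) : Decidable (Spec_expand_address floating_address out) := by
  unfold Spec_expand_address; infer_instance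

-- ===== CLAIM =====
def Claim_equal_expand_address : Prop :=
  ∀ (floating_address : String), Dom_expand_address floating_address →
    Spec_expand_address floating_address (expand_address floating_address)

-- ===== LEMMAS AND PROOFS =====

-- Reference structural recursion: all expansions of s, in A's (and B's) order.
def pvCombos : List Char → List (List Char)
  | [] => [[]]
  | c :: rest =>
    if c = 'X' then
      (pvCombos rest).map ('0' :: ·) ++ (pvCombos rest).map ('1' :: ·)
    else (pvCombos rest).map (c :: ·)

theorem pvCombos_noX (s : List Char) (h : 'X' ∉ s) : pvCombos s = [s] := by
  induction s with
  | nil => rfl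
  | cons c rest ih =>
    simp only [List.mem_cons, not_or] at h
    simp [pvCombos, Ne.symm h.1, ih h.2]

theorem pvExpandA_eq (fuel : Nat) :
    ∀ (pre suf : List Char), 'X' ∉ pre → suf.count 'X' ≤ fuel →
      pvExpandA fuel (pre ++ suf) = (pvCombos suf).map (pre ++ ·) := by
  induction fuel with
  | zero =>
    intro pre suf hpre hc
    have hsuf : 'X' ∉ suf := by
      intro h; have := List.count_pos_iff.mpr h; omega
    simp [pvExpandA, pvCombos_noX suf hsuf]
  | succ fuel ih =>
    intro pre suf hpre hc
    induction suf generalizing pre with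
    | nil =>
      simp only [List.append_nil]
      simp [pvExpandA, hpre, pvCombos]
    | cons c rest ihs =>
      by_cases hcX : c = 'X'
      · subst hcX
        have hmem : 'X' ∈ pre ++ 'X' :: rest := by simp
        have hidx : (pre ++ 'X' :: rest).idxOf 'X' = pre.length := by
          rw [List.idxOf_append_of_notMem hpre]; simp
        have htake : (pre ++ 'X' :: rest).take pre.length = pre := by
          simp
        have hdrop : (pre ++ 'X' :: rest).drop (pre.length + 1) = rest := by
          rw [← List.drop_drop, List.drop_append_of_le_length (le_refl _)]
          simp
        have hcount : rest.count 'X' ≤ fuel := by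
          simp at hc; omega
        have h0 : 'X' ∉ pre ++ ['0'] := by simp [hpre]
        have h1 : 'X' ∉ pre ++ ['1'] := by simp [hpre]
        have e0 := ih (pre ++ ['0']) rest h0 hcount
        have e1 := ih (pre ++ ['1']) rest h1 hcount
        simp only [List.append_assoc, List.singleton_append] at e0 e1
        simp only [pvExpandA, hmem, not_true_eq_false, if_false, hidx, htake, hdrop,
          List.append_assoc, List.singleton_append]
        rw [e0, e1]
        simp [pvCombos, Function.comp_def]
      · have hpre' : 'X' ∉ pre ++ [c] := by
          simp only [List.mem_append, List.mem_singleton, not_or]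
          exact ⟨hpre, Ne.symm hcX⟩
        have hc' : rest.count 'X' ≤ fuel + 1 := by
          simp [List.count_cons] at hc ⊢; omega
        have := ihs (pre ++ [c]) hpre' hc'
        simp only [List.append_assoc, List.singleton_append] at this
        rw [this]
        simp [pvCombos, hcX, Function.comp_def]

theorem pvFoldl_eq (s : List Char) :
    ∀ (R : List (List Char)),
      s.foldl
        (fun results c =>
          if c == 'X' then results.flatMap (fun p => [p ++ ['0'], p ++ ['1']])
          else results.map (fun p => p ++ [c])) R
      = R.flatMap (fun p => (pvCombos s).map (p ++ ·)) := by
  induction s with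
  | nil => intro R; simp [pvCombos]
  | cons c rest ih =>
    intro R
    by_cases hcX : c = 'X'
    · subst hcX
      simp only [List.foldl_cons, BEq.rfl, if_true, ih]
      simp [pvCombos, List.flatMap_assoc, Function.comp_def, List.map_append, List.append_assoc]
    · have : (c == 'X') = false := by simp [hcX]
      simp only [List.foldl_cons, this, ih]
      simp [pvCombos, hcX, List.flatMap_map, Function.comp_def, List.append_assoc]

-- ===== VERDICT =====
theorem expand_address_spec : Claim_equal_expand_address := by
  intro s _
  unfold Spec_expand_address expand_address expand_address_alt
  have h := pvExpandA_eq (s.toList.count 'X') [] s.toList (by simp) (le_refl _)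
  simp only [List.nil_append] at h
  rw [h, pvFoldl_eq]
  simp
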